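-- pv_equiv track=rewrite | github.com/joshanashakya/dissertation | workspace/dataset/java-python/GeeksForGeeks/1043/A/2.py | MaxIncreasingSub
-- ===== SOURCE A (Python) =====
-- def MaxIncreasingSub(arr, n, k):
--
--     # In the implementation dp[n][k] represents
--     # maximum sum subsequence of length k and the
--     # subsequence is ending at index n.
--     dp = [-1]*n
--     ans = -1
--
--     # Initializing whole multidimensional
--     # dp array with value - 1
--     for i in range(n):
--         dp[i] = [-1]*(k+1)
--
--     # For each ith position increasing subsequence
--     # of length 1 is equal to that array ith value
--     # so initializing dp[i][1] with that array value
--     for i in range(n):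
--         dp[i][1] = arr[i]
--
--     # Starting from 1st index as we have calculated
--     # for 0th index. Computing optimized dp values
--     # in bottom-up manner
--     for i in range(1,n):
--         for j in range(i):
--
--             # check for increasing subsequence
--             if arr[j] < arr[i]:
--                 for l in range(1,k):
--
--                     # Proceed if value is pre calculated
--                     if dp[j][l] != -1:
--
--                         # Check for all the subsequences
--                         # ending at any j < i and try including
--                         # element at index i in them for
--                         # some length l. Update the maximum
--                         # value for every length.
--                         dp[i][l+1] = max(dp[i][l+1],
--                                         dp[j][l] + arr[i])
--
--     # The final result would be the maximum
--     # value of dp[i][k] for all different i.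
--     for i in range(n):
--         if ans < dp[i][k]:
--             ans = dp[i][k]
--
--     # When no subsequence of length k is
--     # possible sum would be considered zero
--     return (0 if ans == -1 else ans)
-- ===== SOURCE B (Python) =====
-- def MaxIncreasingSub(arr, n, k):
--     # Length-major DP with two rolling 1-D rows (O(n) extra space) instead of
--     # A's index-major full n x (k+1) table mutated in place.
--     if n <= 0:
--         return 0
--     cur = list(arr[:n])          # cur[i] = best sum of an increasing subsequence
--     for _ in range(k - 1):       #          of the current length ending at i (-1 = none)
--         nxt = []
--         for i in range(n):
--             best = -1
--             for j in range(i):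
--                 if arr[j] < arr[i] and cur[j] != -1 and cur[j] + arr[i] > best:
--                     best = cur[j] + arr[i]
--             nxt.append(best)
--         cur = nxt
--     ans = max(cur)
--     return ans if ans > -1 else 0
-- ===== Notes on version B (the rewrite author's own statement) =====
-- stated objective: alternative
-- what changed: A builds a full n x (k+1) table index-major, mutating cells of row i in place via a triple loop (i, j, l) and a separate init and final scan; B runs the DP length-major with two rolling 1-D rows (O(n) extra space), computing each cell once with a running-max inner scan and taking the maximum of the final row.
import Mathlib
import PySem

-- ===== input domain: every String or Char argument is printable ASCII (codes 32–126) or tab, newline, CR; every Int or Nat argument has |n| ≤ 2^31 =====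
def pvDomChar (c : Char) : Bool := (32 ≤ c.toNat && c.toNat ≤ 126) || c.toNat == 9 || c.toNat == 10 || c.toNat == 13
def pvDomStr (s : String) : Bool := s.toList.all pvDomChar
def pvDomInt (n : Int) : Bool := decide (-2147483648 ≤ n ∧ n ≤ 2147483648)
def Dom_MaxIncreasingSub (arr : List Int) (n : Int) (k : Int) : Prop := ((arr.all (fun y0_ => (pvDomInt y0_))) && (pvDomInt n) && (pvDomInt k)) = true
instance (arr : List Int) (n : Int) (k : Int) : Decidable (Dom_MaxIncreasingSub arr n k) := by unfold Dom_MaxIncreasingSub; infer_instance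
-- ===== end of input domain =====

-- B replaces A's index-major in-place n x (k+1) table DP by a length-major DP on two
-- rolling 1-D rows (same values, O(n) extra space); equivalence proved on Pre_.


-- ===== PORT A =====
-- loop bodies of A's triple loop, as named helpers (indices produced by range(...) are
-- nonnegative, so `.toNat` is exact here; arr[...] is read with pyGetD, in range under Pre_)
def pvA_lbody (arr : List Int) (i j : Int) (dp : List (List Int)) (l : Int) : List (List Int) :=
  -- if dp[j][l] != -1: dp[i][l+1] = max(dp[i][l+1], dp[j][l] + arr[i])
  if (dp.getD j.toNat []).getD l.toNat 0 ≠ -1 then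
    dp.set i.toNat ((dp.getD i.toNat []).set (l+1).toNat
      (max ((dp.getD i.toNat []).getD (l+1).toNat 0)
           ((dp.getD j.toNat []).getD l.toNat 0 + PySem.List.pyGetD arr i 0)))
  else dp

def pvA_jbody (arr : List Int) (k : Int) (i : Int) (dp : List (List Int)) (j : Int) : List (List Int) :=
  -- if arr[j] < arr[i]: for l in range(1, k): ...
  if PySem.List.pyGetD arr j 0 < PySem.List.pyGetD arr i 0 then
    (PySem.List.pyRange 1 k 1).foldl (pvA_lbody arr i j) dp
  else dp

def pvA_ibody (arr : List Int) (k : Int) (dp : List (List Int)) (i : Int) : List (List Int) :=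
  -- for j in range(i): ...
  (PySem.List.pyRange 0 i 1).foldl (pvA_jbody arr k i) dp

def MaxIncreasingSub (arr : List Int) (n : Int) (k : Int) : Int :=
  -- dp = [-1]*n; for i in range(n): dp[i] = [-1]*(k+1)
  -- (every placeholder of [-1]*n is overwritten by a fresh row: one replicate)
  let dp : List (List Int) := List.replicate n.toNat (List.replicate (k + 1).toNat (-1))
  -- for i in range(n): dp[i][1] = arr[i]
  let dp := (PySem.List.pyRange 0 n 1).foldl
    (fun dp i => dp.set i.toNat ((dp.getD i.toNat []).set 1 (PySem.List.pyGetD arr i 0))) dp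
  -- for i in range(1, n): for j in range(i): ...
  let dp := (PySem.List.pyRange 1 n 1).foldl (pvA_ibody arr k) dp
  -- ans = -1; for i in range(n): if ans < dp[i][k]: ans = dp[i][k]
  let ans := (PySem.List.pyRange 0 n 1).foldl
    (fun ans i => if ans < (dp.getD i.toNat []).getD k.toNat 0
                  then (dp.getD i.toNat []).getD k.toNat 0 else ans) (-1)
  -- return (0 if ans == -1 else ans)
  if ans = -1 then 0 else ans

-- ===== PORT B =====
def pvB_jbody (arr : List Int) (cur : List Int) (i : Int) (best : Int) (j : Int) : Int :=
  -- if arr[j] < arr[i] and cur[j] != -1 and cur[j] + arr[i] > best: best = cur[j] + arr[i]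
  if PySem.List.pyGetD arr j 0 < PySem.List.pyGetD arr i 0 ∧
     PySem.List.pyGetD cur j 0 ≠ -1 ∧
     PySem.List.pyGetD cur j 0 + PySem.List.pyGetD arr i 0 > best
  then PySem.List.pyGetD cur j 0 + PySem.List.pyGetD arr i 0 else best

def pvB_ibody (arr : List Int) (cur : List Int) (nxt : List Int) (i : Int) : List Int :=
  -- best = -1; for j in range(i): ...; nxt.append(best)
  nxt ++ [(PySem.List.pyRange 0 i 1).foldl (pvB_jbody arr cur i) (-1)]

def pvB_step (arr : List Int) (n : Int) (cur : List Int) : List Int :=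
  -- nxt = []; for i in range(n): ...; cur = nxt
  (PySem.List.pyRange 0 n 1).foldl (pvB_ibody arr cur) []

def MaxIncreasingSub_alt (arr : List Int) (n : Int) (k : Int) : Int :=
  if n ≤ 0 then 0
  else
    -- cur = list(arr[:n]); for _ in range(k-1): cur = step(cur)
    let cur := (PySem.List.pyRange 0 (k - 1) 1).foldl
      (fun cur _ => pvB_step arr n cur) (PySem.List.slice arr none (some n))
    -- ans = max(cur)  (cur is nonempty under Pre_: 0 < n ≤ len(arr))
    let ans := (PySem.List.max? cur (fun x => x)).getD 0
    if ans > -1 then ans else 0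

-- ===== PRECONDITION & SPEC =====
-- A raises IndexError when n > len(arr) (reads arr[i] for i < n) and, for n > 0,
-- when k < 1 (writes dp[i][1] into a row of length k+1); exactly those are excluded.
def Pre_MaxIncreasingSub (arr : List Int) (n : Int) (k : Int) : Prop :=
  n ≤ (arr.length : Int) ∧ (n ≤ 0 ∨ 1 ≤ k)
instance (arr : List Int) (n : Int) (k : Int) : Decidable (Pre_MaxIncreasingSub arr n k) := by
  unfold Pre_MaxIncreasingSub; infer_instance

def pvWitness_MaxIncreasingSub : List Int × Int × Int := ([1, 101, 2, 3, 100], 5, 3)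

def Spec_MaxIncreasingSub (arr : List Int) (n : Int) (k : Int) (out : Int) : Prop := out = MaxIncreasingSub_alt arr n k
instance (arr : List Int) (n : Int) (k : Int) (out : Int) : Decidable (Spec_MaxIncreasingSub arr n k out) := by unfold Spec_MaxIncreasingSub; infer_instance

-- ===== CLAIM (what is proved, stated in full; the proofs are below) =====
def Claim_equal_MaxIncreasingSub : Prop := ∀ (arr : List Int) (n : Int) (k : Int), Dom_MaxIncreasingSub arr n k → Pre_MaxIncreasingSub arr n k → Spec_MaxIncreasingSub arr n k (MaxIncreasingSub arr n k)


-- ===== LEMMAS AND PROOFS =====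

-- arr[i] as both ports read it (indices are nonnegative, in range under Pre_)
def pvV (arr : List Int) (i : Nat) : Int := arr.getD i 0

-- one cell of the DP: best value obtainable from sources f over j < i (A's max form)
def pvBest (arr : List Int) (f : Nat → Int) (i : Nat) : Int :=
  (List.range i).foldl
    (fun b j => if pvV arr j < pvV arr i ∧ f j ≠ -1 then max b (f j + pvV arr i) else b) (-1)

-- pvF arr t i = dp value for subsequences of length t+1 ending at i
def pvF (arr : List Int) : Nat → Nat → Int
  | 0 => fun i => pvV arr i
  | t + 1 => fun i => pvBest arr (pvF arr t) i

-- partial accumulation of pvBest over j < j0 only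
def pvPart (arr : List Int) (i0 t j0 : Nat) : Int :=
  (List.range j0).foldl
    (fun b j => if pvV arr j < pvV arr i0 ∧ pvF arr t j ≠ -1 then max b (pvF arr t j + pvV arr i0) else b) (-1)

-- rows of A's table at the three stages of its life
def pvInitRow (arr : List Int) (K i : Nat) : List Int :=
  (List.range (K + 1)).map (fun c => if c = 1 then pvV arr i else -1)

def pvRowF (arr : List Int) (K i : Nat) : List Int :=
  (List.range (K + 1)).map (fun c => if c = 0 then -1 else pvF arr (c - 1) i)

def pvMidRow (arr : List Int) (K i0 j0 : Nat) : List Int :=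
  (List.range (K + 1)).map
    (fun c => if c = 0 then -1 else if c = 1 then pvV arr i0 else pvPart arr i0 (c - 2) j0)

def pvLRow (arr : List Int) (K i0 j0 l0 : Nat) : List Int :=
  (List.range (K + 1)).map (fun c =>
    if 2 ≤ c ∧ c ≤ l0 + 1 then
      (if pvF arr (c - 2) j0 ≠ -1 then max (pvPart arr i0 (c - 2) j0) (pvF arr (c - 2) j0 + pvV arr i0)
       else pvPart arr i0 (c - 2) j0)
    else (if c = 0 then -1 else if c = 1 then pvV arr i0 else pvPart arr i0 (c - 2) j0))

-- generic list helpers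
theorem pv_set_mapRange {a : Type} (m i : Nat) (f : Nat → a) (x : a) (_h : i < m) :
    ((List.range m).map f).set i x = (List.range m).map (fun t => if t = i then x else f t) := by
  apply List.ext_getElem (by simp)
  intro t h1 h2
  simp only [List.getElem_set, List.getElem_map, List.getElem_range]
  by_cases ht : t = i
  · simp [ht]
  · simp [ht, Ne.symm ht]

theorem pv_replicate_eq {a : Type} (m : Nat) (x : a) :
    List.replicate m x = (List.range m).map (fun _ => x) := by
  induction m with
  | zero => rfl
  | succ b ih => rw [List.range_succ, List.map_append, ← ih, List.replicate_succ']; rfl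

theorem pv_foldl_const {a b : Type} (g : a → a) :
    ∀ (L : List b) (x : a), L.foldl (fun c _ => g c) x = g^[L.length] x
  | [], x => rfl
  | y :: L, x => by
    simp only [List.foldl_cons, List.length_cons, Function.iterate_succ_apply]
    exact pv_foldl_const g L (g x)

theorem pv_max_fold_shift : ∀ (L : List Int) (x y : Int), L.foldl max (max x y) = max x (L.foldl max y)
  | [], x, y => rfl
  | z :: L, x, y => by
    simp only [List.foldl_cons, max_assoc]
    exact pv_max_fold_shift L x (max y z)

theorem pv_take_eq (arr : List Int) (m : Nat) (hml : m ≤ arr.length) :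
    arr.take m = (List.range m).map (pvV arr) := by
  apply List.ext_getElem (by simp; omega)
  intro t h1 h2
  simp only [List.getElem_take, List.getElem_map, List.getElem_range]
  unfold pvV
  rw [List.getD_eq_getElem arr 0 (by simp at h1; omega)]

theorem pv_pyRange_cast (n : Int) :
    PySem.List.pyRange 0 n 1 = (List.range n.toNat).map (fun t : Nat => (t : Int)) := by
  rw [PySem.List.pyRange_one]
  simp only [Int.sub_zero]
  apply List.map_congr_left
  intro a _
  omega

-- cell-level facts
theorem pv_best_zero (arr : List Int) (f : Nat → Int) : pvBest arr f 0 = -1 := rfl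

theorem pv_part_full (arr : List Int) (t i0 : Nat) : pvPart arr i0 t i0 = pvF arr (t + 1) i0 := rfl

theorem pv_part_succ (arr : List Int) (i0 t j0 : Nat) :
    pvPart arr i0 t (j0 + 1) =
      if pvV arr j0 < pvV arr i0 ∧ pvF arr t j0 ≠ -1
      then max (pvPart arr i0 t j0) (pvF arr t j0 + pvV arr i0) else pvPart arr i0 t j0 := by
  unfold pvPart
  rw [List.range_succ, List.foldl_append]
  simp only [List.foldl_cons, List.foldl_nil]

theorem pv_midrow_zero (arr : List Int) (K i0 : Nat) :
    pvMidRow arr K i0 0 = pvInitRow arr K i0 := by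
  unfold pvMidRow pvInitRow
  apply List.map_congr_left
  intro c _
  rcases c with _ | c
  · rfl
  · rcases c with _ | c
    · rfl
    · simp [pvPart]

theorem pv_midrow_full (arr : List Int) (K i0 : Nat) :
    pvMidRow arr K i0 i0 = pvRowF arr K i0 := by
  unfold pvMidRow pvRowF
  apply List.map_congr_left
  intro c _
  rcases c with _ | c
  · rfl
  · rcases c with _ | c
    · rfl
    · simp [pv_part_full]

theorem pv_rowF_zero (arr : List Int) (K : Nat) :
    pvRowF arr K 0 = pvInitRow arr K 0 := by
  unfold pvRowF pvInitRow
  apply List.map_congr_left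
  intro c _
  rcases c with _ | c
  · rfl
  · rcases c with _ | c
    · simp [pvF]
    · have h : c + 2 - 1 = c + 1 := by omega
      rw [h]
      simp [pvF, pv_best_zero]

theorem pv_lrow_zero (arr : List Int) (K i0 j0 : Nat) :
    pvLRow arr K i0 j0 0 = pvMidRow arr K i0 j0 := by
  unfold pvLRow pvMidRow
  apply List.map_congr_left
  intro c _
  have : ¬ (2 ≤ c ∧ c ≤ 0 + 1) := by omega
  simp [this]

theorem pv_lrow_full (arr : List Int) (K i0 j0 : Nat) (hcond : pvV arr j0 < pvV arr i0) :
    pvLRow arr K i0 j0 (K - 1) = pvMidRow arr K i0 (j0 + 1) := by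
  unfold pvLRow pvMidRow
  apply List.map_congr_left
  intro c hc
  simp only [List.mem_range] at hc
  rcases c with _ | c
  · simp
  · rcases c with _ | c
    · simp
    · have h2 : 2 ≤ c + 2 ∧ c + 2 ≤ K - 1 + 1 := by omega
      simp only [h2, and_self, if_true]
      rw [pv_part_succ]
      by_cases hne : pvF arr (c + 2 - 2) j0 ≠ -1
      · simp [hcond]
      · simp at hne
        simp [hne]

-- ===== B side =====
theorem pvB_best_eq (arr : List Int) (m : Nat) (f : Nat → Int) (i0 : Nat) (hi : i0 ≤ m) :
    (PySem.List.pyRange 0 (i0 : Int) 1).foldl (pvB_jbody arr ((List.range m).map f) (i0 : Int)) (-1)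
      = pvBest arr f i0 := by
  rw [pv_pyRange_cast]
  simp only [Int.toNat_natCast]
  rw [List.foldl_map]
  unfold pvBest
  apply PySem.List.foldl_congr_mem
  intro b j hj
  simp only [List.mem_range] at hj
  unfold pvB_jbody
  rw [PySem.List.pyGetD_natCast, PySem.List.pyGetD_natCast, PySem.List.pyGetD_natCast,
      PySem.List.getD_map_range f m j 0 (lt_of_lt_of_le hj hi)]
  show (if arr.getD j 0 < arr.getD i0 0 ∧ f j ≠ -1 ∧ f j + arr.getD i0 0 > b
        then f j + arr.getD i0 0 else b)
     = (if pvV arr j < pvV arr i0 ∧ f j ≠ -1 then max b (f j + pvV arr i0) else b)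
  unfold pvV
  by_cases h1 : arr.getD j 0 < arr.getD i0 0 ∧ f j ≠ -1
  · rw [if_pos h1]
    by_cases h2 : f j + arr.getD i0 0 > b
    · rw [if_pos ⟨h1.1, h1.2, h2⟩, max_eq_right (le_of_lt h2)]
    · rw [if_neg (fun hc => h2 hc.2.2), max_eq_left (not_lt.mp h2)]
  · rw [if_neg h1, if_neg (fun hc => h1 ⟨hc.1, hc.2.1⟩)]

theorem pvB_step_eq (arr : List Int) (n : Int) (m : Nat) (hm : n.toNat = m) (f : Nat → Int) :
    pvB_step arr n ((List.range m).map f) = (List.range m).map (fun i => pvBest arr f i) := by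
  unfold pvB_step
  rw [show (pvB_ibody arr ((List.range m).map f)) = (fun nxt i => nxt ++
        [(PySem.List.pyRange 0 i 1).foldl (pvB_jbody arr ((List.range m).map f) i) (-1)]) from rfl]
  rw [PySem.List.foldl_append_singleton_eq_map, List.nil_append, pv_pyRange_cast, hm, List.map_map]
  apply List.map_congr_left
  intro i hi
  simp only [List.mem_range] at hi
  exact pvB_best_eq arr m f i (le_of_lt hi)

theorem pvB_iter (arr : List Int) (n : Int) (m : Nat) (hm : n.toNat = m) :
    ∀ t : Nat, (pvB_step arr n)^[t] ((List.range m).map (pvV arr))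
      = (List.range m).map (pvF arr t) := by
  intro t
  induction t with
  | zero => rfl
  | succ t ih =>
    rw [Function.iterate_succ_apply', ih, pvB_step_eq arr n m hm]
    rfl

-- ===== A side =====
theorem pv_lrow_succ (arr : List Int) (K i0 j0 l0 : Nat) (hl : l0 + 1 ≤ K - 1) :
    pvLRow arr K i0 j0 (l0 + 1) =
      if pvF arr l0 j0 ≠ -1 then
        (pvLRow arr K i0 j0 l0).set (l0 + 2)
          (max (pvPart arr i0 l0 j0) (pvF arr l0 j0 + pvV arr i0))
      else pvLRow arr K i0 j0 l0 := by
  have hcell : ∀ c, c ≠ l0 + 2 →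
      (if 2 ≤ c ∧ c ≤ l0 + 1 + 1 then
        (if pvF arr (c - 2) j0 ≠ -1 then max (pvPart arr i0 (c - 2) j0) (pvF arr (c - 2) j0 + pvV arr i0)
         else pvPart arr i0 (c - 2) j0)
       else (if c = 0 then -1 else if c = 1 then pvV arr i0 else pvPart arr i0 (c - 2) j0))
    = (if 2 ≤ c ∧ c ≤ l0 + 1 then
        (if pvF arr (c - 2) j0 ≠ -1 then max (pvPart arr i0 (c - 2) j0) (pvF arr (c - 2) j0 + pvV arr i0)
         else pvPart arr i0 (c - 2) j0)
       else (if c = 0 then -1 else if c = 1 then pvV arr i0 else pvPart arr i0 (c - 2) j0)) := by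
    intro c hc
    by_cases h2 : 2 ≤ c ∧ c ≤ l0 + 1
    · rw [if_pos (by omega : 2 ≤ c ∧ c ≤ l0 + 1 + 1), if_pos h2]
    · rw [if_neg (by omega : ¬(2 ≤ c ∧ c ≤ l0 + 1 + 1)), if_neg h2]
  have hmain : ∀ v : Int,
      (if pvF arr l0 j0 ≠ -1 then max (pvPart arr i0 l0 j0) (pvF arr l0 j0 + pvV arr i0)
       else pvPart arr i0 l0 j0) = v →
      pvLRow arr K i0 j0 (l0 + 1) = (pvLRow arr K i0 j0 l0).set (l0 + 2) v := by
    intro v hv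
    unfold pvLRow
    rw [pv_set_mapRange (K + 1) (l0 + 2) _ _ (by omega)]
    apply List.map_congr_left
    intro c _
    by_cases hc : c = l0 + 2
    · subst hc
      rw [if_pos rfl, if_pos (by omega : 2 ≤ l0 + 2 ∧ l0 + 2 ≤ l0 + 1 + 1), ← hv]
      simp
    · rw [if_neg hc]
      exact hcell c hc
  by_cases hne : pvF arr l0 j0 ≠ -1
  · rw [if_pos hne]
    exact hmain _ (by rw [if_pos hne])
  · rw [if_neg hne]
    unfold pvLRow
    apply List.map_congr_left
    intro c _
    by_cases hc : c = l0 + 2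
    · subst hc
      rw [if_pos (by omega : 2 ≤ l0 + 2 ∧ l0 + 2 ≤ l0 + 1 + 1),
          if_neg (by omega : ¬(2 ≤ l0 + 2 ∧ l0 + 2 ≤ l0 + 1)),
          if_neg (by omega : ¬(l0 + 2 = 0)), if_neg (by omega : ¬(l0 + 2 = 1))]
      simp at hne
      simp [hne]
    · exact hcell c hc

theorem pv_lfold_aux (arr : List Int) (K m i0 j0 : Nat) (D : Nat → List Int)
    (hi0 : i0 < m) (hj0 : j0 < i0)
    (hDj : D j0 = pvRowF arr K j0) (hDi : D i0 = pvMidRow arr K i0 j0) :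
    ∀ l0 : Nat, l0 ≤ K - 1 →
    ((List.range l0).map (fun t : Nat => (1 : Int) + t)).foldl (pvA_lbody arr (i0 : Int) (j0 : Int))
        ((List.range m).map D)
      = (List.range m).map (fun t => if t = i0 then pvLRow arr K i0 j0 l0 else D t) := by
  intro l0
  induction l0 with
  | zero =>
    intro _
    simp only [List.range_zero, List.map_nil, List.foldl_nil]
    apply List.map_congr_left
    intro t _
    by_cases ht : t = i0
    · rw [if_pos ht, ht, pv_lrow_zero, ← hDi]
    · rw [if_neg ht]
  | succ l0 ih =>
    intro hl
    rw [List.range_succ, List.map_append, List.foldl_append, ih (by omega)]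
    simp only [List.map_cons, List.map_nil, List.foldl_cons, List.foldl_nil]
    have hKl : l0 + 1 < K + 1 := by omega
    have hKl2 : l0 + 2 < K + 1 := by omega
    have hcast : (1 : Int) + (l0 : Int) = ((l0 + 1 : Nat) : Int) := by push_cast; ring
    unfold pvA_lbody
    rw [hcast]
    have hcast2 : ((l0 + 1 : Nat) : Int) + 1 = ((l0 + 2 : Nat) : Int) := by push_cast; ring
    rw [hcast2]
    simp only [Int.toNat_natCast]
    have hpv : ∀ i : Nat, PySem.List.pyGetD arr (i : Int) 0 = pvV arr i :=
      fun i => PySem.List.pyGetD_natCast arr i 0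
    have hgetj : ((List.range m).map (fun t => if t = i0 then pvLRow arr K i0 j0 l0 else D t)).getD j0 []
        = pvRowF arr K j0 := by
      rw [PySem.List.getD_map_range _ m j0 [] (by omega), if_neg (by omega : ¬(j0 = i0)), hDj]
    have hgeti : ((List.range m).map (fun t => if t = i0 then pvLRow arr K i0 j0 l0 else D t)).getD i0 []
        = pvLRow arr K i0 j0 l0 := by
      rw [PySem.List.getD_map_range _ m i0 [] hi0, if_pos rfl]
    have hcellj : (pvRowF arr K j0).getD (l0 + 1) 0 = pvF arr l0 j0 := by
      unfold pvRowF
      rw [PySem.List.getD_map_range _ (K + 1) (l0 + 1) 0 (by omega)]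
      simp
    have hcelli : (pvLRow arr K i0 j0 l0).getD (l0 + 2) 0 = pvPart arr i0 l0 j0 := by
      unfold pvLRow
      rw [PySem.List.getD_map_range _ (K + 1) (l0 + 2) 0 (by omega)]
      rw [if_neg (by omega : ¬(2 ≤ l0 + 2 ∧ l0 + 2 ≤ l0 + 1)),
          if_neg (by omega : ¬(l0 + 2 = 0)), if_neg (by omega : ¬(l0 + 2 = 1))]
      simp
    rw [hgetj, hgeti, hcellj, hcelli, hpv i0]
    by_cases hne : pvF arr l0 j0 ≠ -1
    · rw [if_pos hne, pv_set_mapRange m i0 _ _ hi0]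
      apply List.map_congr_left
      intro t _
      by_cases hti : t = i0
      · rw [if_pos hti, if_pos hti, pv_lrow_succ arr K i0 j0 l0 (by omega), if_pos hne]
      · rw [if_neg hti, if_neg hti, if_neg hti]
    · rw [if_neg hne]
      apply List.map_congr_left
      intro t _
      by_cases hti : t = i0
      · rw [if_pos hti, if_pos hti, pv_lrow_succ arr K i0 j0 l0 (by omega), if_neg hne]
      · rw [if_neg hti, if_neg hti]


theorem pv_jfold_aux (arr : List Int) (k : Int) (K m i0 : Nat) (hkK : k.toNat = K) (hK : 1 ≤ K)
    (hi0 : i0 < m) (D : Nat → List Int)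
    (hDlt : ∀ j, j < i0 → D j = pvRowF arr K j) (hDi : D i0 = pvInitRow arr K i0) :
    ∀ j0, j0 ≤ i0 →
    ((List.range j0).map (fun t : Nat => (t : Int))).foldl (pvA_jbody arr k (i0 : Int))
        ((List.range m).map D)
      = (List.range m).map (fun t => if t = i0 then pvMidRow arr K i0 j0 else D t) := by
  intro j0
  induction j0 with
  | zero =>
    intro _
    simp only [List.range_zero, List.map_nil, List.foldl_nil]
    apply List.map_congr_left
    intro t _
    by_cases ht : t = i0
    · rw [if_pos ht, ht, pv_midrow_zero, ← hDi]
    · rw [if_neg ht]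
  | succ j0 ih =>
    intro hj
    rw [List.range_succ, List.map_append, List.foldl_append, ih (by omega)]
    simp only [List.map_cons, List.map_nil, List.foldl_cons, List.foldl_nil]
    have hpv : ∀ i : Nat, PySem.List.pyGetD arr (i : Int) 0 = pvV arr i :=
      fun i => PySem.List.pyGetD_natCast arr i 0
    unfold pvA_jbody
    rw [hpv j0, hpv i0]
    by_cases hcond : pvV arr j0 < pvV arr i0
    · rw [if_pos hcond]
      rw [PySem.List.pyRange_one 1 k, (show (k - 1).toNat = K - 1 by omega)]
      rw [pv_lfold_aux arr K m i0 j0 (fun t => if t = i0 then pvMidRow arr K i0 j0 else D t)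
            hi0 (by omega)
            (by show (if j0 = i0 then pvMidRow arr K i0 j0 else D j0) = pvRowF arr K j0
                rw [if_neg (by omega : ¬(j0 = i0))]; exact hDlt j0 (by omega))
            (by show (if i0 = i0 then pvMidRow arr K i0 j0 else D i0) = pvMidRow arr K i0 j0
                rw [if_pos rfl]) (K - 1) (le_refl _)]
      apply List.map_congr_left
      intro t _
      by_cases ht : t = i0
      · rw [if_pos ht, if_pos ht, pv_lrow_full arr K i0 j0 hcond]
      · rw [if_neg ht, if_neg ht, if_neg ht]
    · rw [if_neg hcond]
      apply List.map_congr_left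
      intro t _
      by_cases ht : t = i0
      · rw [if_pos ht, if_pos ht]
        unfold pvMidRow
        apply List.map_congr_left
        intro c _
        rcases c with _ | c
        · rfl
        · rcases c with _ | c
          · rfl
          · rw [if_neg (show ¬(c + 1 + 1 = 0) by omega), if_neg (show ¬(c + 1 + 1 = 1) by omega),
                if_neg (show ¬(c + 1 + 1 = 0) by omega), if_neg (show ¬(c + 1 + 1 = 1) by omega),
                pv_part_succ,
                if_neg (show ¬(pvV arr j0 < pvV arr i0 ∧ pvF arr (c + 1 + 1 - 2) j0 ≠ -1) from
                  fun hc2 => hcond hc2.1)]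
      · rw [if_neg ht, if_neg ht]

theorem pv_ifold_aux (arr : List Int) (k : Int) (K m : Nat) (hkK : k.toNat = K) (hK : 1 ≤ K)
    (hm1 : 1 ≤ m) :
    ∀ b, b ≤ m - 1 →
    ((List.range b).map (fun t : Nat => (1 : Int) + t)).foldl (pvA_ibody arr k)
        ((List.range m).map (pvInitRow arr K))
      = (List.range m).map (fun t => if t ≤ b then pvRowF arr K t else pvInitRow arr K t) := by
  intro b
  induction b with
  | zero =>
    intro _
    simp only [List.range_zero, List.map_nil, List.foldl_nil]
    apply List.map_congr_left
    intro t _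
    by_cases ht : t ≤ 0
    · rw [if_pos ht, (show t = 0 by omega), pv_rowF_zero]
    · rw [if_neg ht]
  | succ b ih =>
    intro hb
    rw [List.range_succ, List.map_append, List.foldl_append, ih (by omega)]
    simp only [List.map_cons, List.map_nil, List.foldl_cons, List.foldl_nil]
    unfold pvA_ibody
    rw [(show (1 : Int) + (b : Int) = ((b + 1 : Nat) : Int) by push_cast; ring)]
    rw [pv_pyRange_cast, Int.toNat_natCast]
    rw [pv_jfold_aux arr k K m (b + 1) hkK hK (by omega)
          (fun t => if t ≤ b then pvRowF arr K t else pvInitRow arr K t)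
          (fun j hj => by
            show (if j ≤ b then pvRowF arr K j else pvInitRow arr K j) = pvRowF arr K j
            rw [if_pos (by omega : j ≤ b)])
          (by show (if b + 1 ≤ b then pvRowF arr K (b + 1) else pvInitRow arr K (b + 1))
                = pvInitRow arr K (b + 1)
              rw [if_neg (by omega : ¬(b + 1 ≤ b))]) (b + 1) (le_refl _)]
    apply List.map_congr_left
    intro t _
    by_cases ht : t = b + 1
    · rw [if_pos ht, ht, pv_midrow_full, if_pos (by omega : b + 1 ≤ b + 1)]
    · rw [if_neg ht]
      by_cases h2 : t ≤ b
      · rw [if_pos h2, if_pos (by omega : t ≤ b + 1)]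
      · rw [if_neg h2, if_neg (by omega : ¬(t ≤ b + 1))]

theorem pv_init_fold (arr : List Int) (K m : Nat) (hK : 1 ≤ K) :
    ∀ b, b ≤ m →
    ((List.range b).map (fun t : Nat => (t : Int))).foldl
        (fun dp i => dp.set i.toNat ((dp.getD i.toNat []).set 1 (PySem.List.pyGetD arr i 0)))
        ((List.range m).map (fun _ => List.replicate (K + 1) (-1 : Int)))
      = (List.range m).map
          (fun t => if t < b then pvInitRow arr K t else List.replicate (K + 1) (-1 : Int)) := by
  intro b
  induction b with
  | zero =>
    intro _
    simp only [List.range_zero, List.map_nil, List.foldl_nil]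
    apply List.map_congr_left
    intro t _
    rw [if_neg (by omega : ¬(t < 0))]
  | succ b ih =>
    intro hb
    rw [List.range_succ, List.map_append, List.foldl_append, ih (by omega)]
    simp only [List.map_cons, List.map_nil, List.foldl_cons, List.foldl_nil, Int.toNat_natCast]
    rw [PySem.List.getD_map_range _ m b [] (by omega), if_neg (by omega : ¬(b < b))]
    rw [PySem.List.pyGetD_natCast arr b 0]
    rw [pv_replicate_eq (K + 1) (-1 : Int), pv_set_mapRange (K + 1) 1 _ _ (by omega)]
    rw [pv_set_mapRange m b _ _ (by omega)]
    apply List.map_congr_left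
    intro t _
    by_cases ht : t = b
    · rw [if_pos ht, (show t < b + 1 by omega) |> if_pos]
      rw [ht]
      unfold pvInitRow pvV
      apply List.map_congr_left
      intro c _
      by_cases hc : c = 1
      · rw [if_pos hc]
      · rw [if_neg hc]
    · rw [if_neg ht]
      by_cases h2 : t < b
      · rw [if_pos h2, if_pos (by omega : t < b + 1)]
      · rw [if_neg h2, if_neg (by omega : ¬(t < b + 1)), ← pv_replicate_eq]

theorem pv_ans_fold (dp : List (List Int)) (kt m : Nat) :
    ((List.range m).map (fun t : Nat => (t : Int))).foldl
        (fun ans i => if ans < (dp.getD i.toNat []).getD kt 0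
                      then (dp.getD i.toNat []).getD kt 0 else ans) (-1)
      = ((List.range m).map (fun t => (dp.getD t []).getD kt 0)).foldl max (-1) := by
  rw [List.foldl_map, List.foldl_map]
  apply PySem.List.foldl_congr_mem
  intro a t _
  simp only [Int.toNat_natCast]
  by_cases h : a < (dp.getD t []).getD kt 0
  · rw [if_pos h, max_eq_right (le_of_lt h)]
  · rw [if_neg h, max_eq_left (not_lt.mp h)]

-- ===== VERDICT (by name: the statement is the Claim_ definition above) =====
theorem MaxIncreasingSub_spec : Claim_equal_MaxIncreasingSub := by
  intro arr n k _ hpre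
  obtain ⟨hlen, hk⟩ := hpre
  unfold Spec_MaxIncreasingSub
  simp only [MaxIncreasingSub, MaxIncreasingSub_alt]
  by_cases hn : n ≤ 0
  · rw [if_pos hn]
    rw [PySem.List.pyRange_one_eq_nil hn, PySem.List.pyRange_one_eq_nil (by omega : n ≤ 1)]
    simp
  · have hk1 : 1 ≤ k := by
      rcases hk with h | h
      · omega
      · exact h
    rw [if_neg hn]
    have hm1 : 1 ≤ n.toNat := by omega
    have hK1 : 1 ≤ k.toNat := by omega
    have hlen' : n.toNat ≤ arr.length := by omega
    -- A side
    rw [(show (k + 1).toNat = k.toNat + 1 by omega)]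
    rw [pv_replicate_eq n.toNat (List.replicate (k.toNat + 1) (-1 : Int))]
    simp only [pv_pyRange_cast]
    rw [pv_init_fold arr k.toNat n.toNat hK1 n.toNat (le_refl _)]
    rw [List.map_congr_left
          (fun t ht => by
            rw [if_pos (List.mem_range.mp ht)] :
          ∀ t ∈ List.range n.toNat,
            (if t < n.toNat then pvInitRow arr k.toNat t else List.replicate (k.toNat + 1) (-1 : Int))
              = pvInitRow arr k.toNat t)]
    rw [PySem.List.pyRange_one 1 n, (show (n - 1).toNat = n.toNat - 1 by omega)]
    rw [pv_ifold_aux arr k k.toNat n.toNat rfl hK1 hm1 (n.toNat - 1) (le_refl _)]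
    rw [List.map_congr_left
          (fun t ht => by
            rw [if_pos (show t ≤ n.toNat - 1 by have := List.mem_range.mp ht; omega)] :
          ∀ t ∈ List.range n.toNat,
            (if t ≤ n.toNat - 1 then pvRowF arr k.toNat t else pvInitRow arr k.toNat t)
              = pvRowF arr k.toNat t)]
    rw [pv_ans_fold ((List.range n.toNat).map (pvRowF arr k.toNat)) k.toNat n.toNat]
    rw [List.map_congr_left
          (fun t ht => by
            rw [PySem.List.getD_map_range _ n.toNat t [] (List.mem_range.mp ht)]
            unfold pvRowF
            rw [PySem.List.getD_map_range _ (k.toNat + 1) k.toNat 0 (by omega)]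
            rw [if_neg (by omega : ¬(k.toNat = 0))] :
          ∀ t ∈ List.range n.toNat,
            ((((List.range n.toNat).map (pvRowF arr k.toNat)).getD t []).getD k.toNat 0)
              = pvF arr (k.toNat - 1) t)]
    -- B side
    rw [PySem.List.slice_to arr (by omega : (0 : Int) ≤ n)]
    rw [pv_take_eq arr n.toNat hlen']
    rw [pv_foldl_const (pvB_step arr n)]
    rw [List.length_map, List.length_range, (show (k - 1).toNat = k.toNat - 1 by omega)]
    rw [pvB_iter arr n n.toNat rfl (k.toNat - 1)]
    -- both sides now speak about cur := (range n.toNat).map (pvF arr (k.toNat - 1))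
    obtain ⟨x, xs, hL⟩ := List.exists_cons_of_ne_nil
      (show (List.range n.toNat).map (pvF arr (k.toNat - 1)) ≠ [] by simp; omega)
    rw [hL, PySem.List.max?_id_cons]
    rw [List.foldl_cons, (show max (-1 : Int) x = max (-1) x from rfl), pv_max_fold_shift]
    simp only [Option.getD_some]
    by_cases hM : xs.foldl max x > -1
    · rw [max_eq_right (by omega : (-1 : Int) ≤ xs.foldl max x),
          if_neg (by omega : ¬(xs.foldl max x = -1)), if_pos hM]
    · rw [max_eq_left (by omega : xs.foldl max x ≤ -1), if_pos rfl, if_neg hM]
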